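-- pv_equiv track=rewrite | github.com/cognitedata/toolkit | cognite_toolkit/_cdf_tk/data_classes/_config_yaml.py | _find_common_parent
-- ===== SOURCE A (Python) =====
-- def _find_common_parent(key_parents: list[tuple[str, ...]]) -> tuple[str, ...]:
--     """Find the common parent for a list of key parents."""
--     if len(key_parents) == 1:
--         return key_parents[0]
--     common_parent = []
--     for i in range(len(key_parents[0])):
--         if len({key_parent[i] if i < len(key_parent) else None for key_parent in key_parents}) == 1:
--             common_parent.append(key_parents[0][i])
--         else:
--             break
--     return tuple(common_parent)
-- ===== SOURCE B (Python) =====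
-- def _find_common_parent(key_parents: list[tuple[str, ...]]) -> tuple[str, ...]:
--     """Find the common parent for a list of key parents."""
--     common = key_parents[0]
--     for kp in key_parents[1:]:
--         i = 0
--         while i < len(common) and i < len(kp) and common[i] == kp[i]:
--             i += 1
--         common = common[:i]
--     return common
-- ===== Notes on version B (the rewrite author's own statement) =====
-- stated objective: simpler
-- what changed: Replaces A's column-by-column loop that builds a set of the i-th elements of all tuples per column with a row-by-row fold that shrinks a pairwise common prefix against each remaining tuple; Pre_ excludes only the empty list, where both raise IndexError.
import Mathlib
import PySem

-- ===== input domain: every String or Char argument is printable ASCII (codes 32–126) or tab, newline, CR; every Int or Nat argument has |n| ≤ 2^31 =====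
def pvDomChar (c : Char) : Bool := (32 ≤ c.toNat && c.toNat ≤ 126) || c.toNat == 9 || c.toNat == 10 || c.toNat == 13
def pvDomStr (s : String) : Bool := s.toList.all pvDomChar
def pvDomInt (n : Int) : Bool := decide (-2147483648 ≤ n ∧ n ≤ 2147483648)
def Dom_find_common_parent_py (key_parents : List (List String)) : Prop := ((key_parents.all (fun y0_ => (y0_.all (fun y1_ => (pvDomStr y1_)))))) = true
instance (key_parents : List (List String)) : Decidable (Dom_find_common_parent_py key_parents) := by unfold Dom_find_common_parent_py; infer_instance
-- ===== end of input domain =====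

-- B replaces A's per-column set-cardinality scan by a shrinking pairwise common prefix
-- maintained row by row (objective: simpler). Both raise IndexError on [] (outside Pre_).

-- ===== PORT A =====
-- the 'for i in range(len(key_parents[0]))' loop with break, accumulating common_parent
def findCommonParentLoop (kps : List (List String)) (first : List String) :
    Nat → Nat → List String → List String
  | 0, _, acc => acc
  | fuel + 1, i, acc =>
    if (PySem.Set.ofList (kps.map (fun kp => kp[i]?))).length == 1 then
      findCommonParentLoop kps first fuel (i + 1) (acc ++ [first.getD i ""])
    else acc

def find_common_parent_py (key_parents : List (List String)) : List String :=
  if key_parents.length == 1 then key_parents.headD []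
  else
    let first := key_parents.headD []
    findCommonParentLoop key_parents first first.length 0 []

-- ===== PORT B =====
-- 'advance i while i < len(common) and i < len(kp) and common[i] == kp[i]'
def prefLen : List String → List String → Nat
  | a :: as, b :: bs => if a == b then prefLen as bs + 1 else 0
  | _, _ => 0

def find_common_parent_py_alt : List (List String) → List String
  | [] => []
  | first :: rest => rest.foldl (fun common kp => common.take (prefLen common kp)) first

-- ===== PRECONDITION & SPEC =====
-- Python A raises IndexError on the empty list (key_parents[0]); so does B.
def Pre_find_common_parent_py (key_parents : List (List String)) : Prop := key_parents ≠ []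
instance (key_parents : List (List String)) : Decidable (Pre_find_common_parent_py key_parents) := by unfold Pre_find_common_parent_py; infer_instance
def pvWitness_find_common_parent_py : List (List String) := [["a", "b"], ["a", "c"]]

def Spec_find_common_parent_py (key_parents : List (List String)) (out : List String) : Prop := out = find_common_parent_py_alt key_parents
instance (key_parents : List (List String)) (out : List String) : Decidable (Spec_find_common_parent_py key_parents out) := by unfold Spec_find_common_parent_py; infer_instance

-- ===== CLAIM (what is proved, stated in full; the proofs are below) =====
def Claim_equal_find_common_parent_py : Prop := ∀ (key_parents : List (List String)), Dom_find_common_parent_py key_parents → Pre_find_common_parent_py key_parents → Spec_find_common_parent_py key_parents (find_common_parent_py key_parents)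

-- ===== LEMMAS AND PROOFS =====

-- pairwise common prefix as a single function (B's step)
def pref (l m : List String) : List String := l.take (prefLen l m)

lemma pref_nil_left (m : List String) : pref [] m = [] := by cases m <;> rfl

lemma foldl_pref_nil (kps : List (List String)) :
    kps.foldl (fun c kp => c.take (prefLen c kp)) [] = [] := by
  induction kps with
  | nil => rfl
  | cons kp rest ih => simpa [pref_nil_left kp ▸ (rfl : pref [] kp = [].take (prefLen [] kp))] using ih

-- column-consuming mediator
def cf : List String → List (List String) → List String
  | [], _ => []
  | a :: as, kps =>
    if kps.all (fun kp => kp.head? == some a) then a :: cf as (kps.map List.tail) else []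

-- B's fold unfolds one column at a time
lemma foldl_pref_cons (a : String) (as : List String) (kps : List (List String)) :
    kps.foldl (fun c kp => c.take (prefLen c kp)) (a :: as) =
      if kps.all (fun kp => kp.head? == some a) then
        a :: ((kps.map List.tail).foldl (fun c kp => c.take (prefLen c kp)) as)
      else [] := by
  induction kps generalizing as with
  | nil => simp
  | cons kp rest ih =>
    cases kp with
    | nil =>
      have h1 : (a :: as).take (prefLen (a :: as) []) = [] := rfl
      simp [List.foldl_cons, h1, foldl_pref_nil]
    | cons b bs =>
      by_cases hab : a = b
      · subst hab
        simp only [List.foldl_cons, List.all_cons, List.map_cons, List.tail_cons]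
        have h2 : (a :: as).take (prefLen (a :: as) (a :: bs)) = a :: as.take (prefLen as bs) := by
          simp [prefLen]
        rw [h2, ih]
        simp
      · have h1 : (a :: as).take (prefLen (a :: as) (b :: bs)) = [] := by
          simp [prefLen, hab]
        simp only [List.foldl_cons, h1, foldl_pref_nil, List.all_cons]
        rw [if_neg]
        simp only [Bool.and_eq_true, beq_iff_eq, List.head?_cons, Option.some.injEq, not_and]
        intro h
        exact (hab h.symm).elim

lemma B_eq_cf (first : List String) (kps : List (List String)) :
    kps.foldl (fun c kp => c.take (prefLen c kp)) first = cf first kps := by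
  induction first generalizing kps with
  | nil => simp [cf, foldl_pref_nil]
  | cons a as ih => rw [foldl_pref_cons, cf]; split <;> simp [ih]

-- cf ignores a leading copy of the remaining first-suffix
lemma cf_self_cons (s : List String) (kps : List (List String)) :
    cf s (s :: kps) = cf s kps := by
  induction s generalizing kps with
  | nil => rfl
  | cons a as ih =>
    simp only [cf, List.all_cons, List.head?_cons, List.map_cons, List.tail_cons]
    simp [ih]

-- the set-cardinality test is "all columns equal", given a known member of the column
lemma set_len_one_iff {α : Type} [BEq α] [LawfulBEq α] (l : List α) (v : α) (hv : v ∈ l) :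
    ((PySem.Set.ofList l).length == 1) = true ↔ ∀ x ∈ l, x = v := by
  constructor
  · intro h x hx
    have hlen : (PySem.Set.ofList l).length = 1 := by simpa using h
    obtain ⟨a, ha⟩ := List.length_eq_one_iff.mp hlen
    have hx' : x ∈ PySem.Set.ofList l := (PySem.Set.mem_ofList _ _).mpr hx
    have hv' : v ∈ PySem.Set.ofList l := (PySem.Set.mem_ofList _ _).mpr hv
    rw [ha] at hx' hv'
    simp at hx' hv'; rw [hx', hv']
  · intro h
    have : PySem.Set.ofList l = [v] := by
      have hnd := PySem.Set.nodup_ofList (xs := l)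
      have hv' : v ∈ PySem.Set.ofList l := (PySem.Set.mem_ofList _ _).mpr hv
      have hsub : ∀ x ∈ PySem.Set.ofList l, x = v := fun x hx =>
        h x ((PySem.Set.mem_ofList _ _).mp hx)
      cases hs : PySem.Set.ofList l with
      | nil => rw [hs] at hv'; cases hv'
      | cons y ys =>
        rw [hs] at hsub hnd
        have hy : y = v := hsub y (by simp)
        have hys : ys = [] := by
          cases ys with
          | nil => rfl
          | cons z zs =>
            have hz : z = v := hsub z (by simp)
            have := hnd
            simp [hy, hz] at this
        rw [hy, hys]
    simp [this]

-- accumulator lemma for A's loop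
lemma findCommonParentLoop_acc (kps : List (List String)) (first : List String)
    (fuel i : Nat) (acc : List String) :
    findCommonParentLoop kps first fuel i acc =
      acc ++ findCommonParentLoop kps first fuel i [] := by
  induction fuel generalizing i acc with
  | zero => simp [findCommonParentLoop]
  | succ n ih =>
    simp only [findCommonParentLoop]
    split
    · rw [ih (i + 1) (acc ++ [first.getD i ""]), ih (i + 1) ([] ++ [first.getD i ""])]
      simp
    · simp

-- A's indexed loop computes cf on the dropped suffix
lemma A_loop_eq_cf (first : List String) (kps : List (List String)) (hmem : first ∈ kps) :
    ∀ (s : List String) (i : Nat), s = first.drop i →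
      findCommonParentLoop kps first s.length i [] = cf s (kps.map (List.drop i)) := by
  intro s
  induction s with
  | nil => intro i _; rfl
  | cons a as ih =>
    intro i hs
    have hfirst_i : first[i]? = some a := by
      rw [← List.head?_drop, ← hs]; rfl
    have hcond : ((PySem.Set.ofList (kps.map (fun kp => kp[i]?))).length == 1) = true ↔
        ∀ kp ∈ kps, kp[i]? = some a := by
      have hmem' : some a ∈ kps.map (fun kp => kp[i]?) :=
        List.mem_map.mpr ⟨first, hmem, hfirst_i⟩
      rw [set_len_one_iff _ (some a) hmem']
      constructor
      · intro h kp hkp; exact h _ (List.mem_map.mpr ⟨kp, hkp, rfl⟩)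
      · intro h x hx
        obtain ⟨kp, hkp, rfl⟩ := List.mem_map.mp hx
        exact h kp hkp
    have hcf : (kps.map (List.drop i)).all (fun kp => kp.head? == some a) = true ↔
        ∀ kp ∈ kps, kp[i]? = some a := by
      rw [List.all_eq_true]
      constructor
      · intro h kp hkp
        have := h (kp.drop i) (List.mem_map.mpr ⟨kp, hkp, rfl⟩)
        rw [← List.head?_drop]; simpa using this
      · intro h x hx
        obtain ⟨kp, hkp, rfl⟩ := List.mem_map.mp hx
        simp [List.head?_drop, h kp hkp]
    simp only [List.length_cons, findCommonParentLoop, cf]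
    by_cases hc : ∀ kp ∈ kps, kp[i]? = some a
    · rw [if_pos (hcond.mpr hc), if_pos (by rw [hcf]; exact hc)]
      have hgetD : first.getD i "" = a := by
        simp [List.getD, hfirst_i]
      rw [findCommonParentLoop_acc, hgetD]
      have hdrop : as = first.drop (i + 1) := by
        have : (first.drop i).tail = first.drop (i + 1) := by
          rw [← List.drop_drop]; simp
        rw [← this, ← hs]; rfl
      rw [ih (i + 1) hdrop]
      have hmap : (kps.map (List.drop i)).map List.tail = kps.map (List.drop (i + 1)) := by
        rw [List.map_map]
        apply List.map_congr_left
        intro kp _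
        simp only [Function.comp_apply]
        rw [← List.drop_drop]; simp
      rw [hmap]
      simp
    · rw [if_neg (fun h => hc (hcond.mp h)), if_neg (fun h => hc (hcf.mp h))]

-- ===== VERDICT (by name: the statement is the Claim_ definition above) =====
theorem find_common_parent_py_spec : Claim_equal_find_common_parent_py := by
  intro kps _ hpre
  unfold Spec_find_common_parent_py find_common_parent_py find_common_parent_py_alt
  cases kps with
  | nil => exact absurd rfl hpre
  | cons first rest =>
    cases rest with
    | nil => simp
    | cons kp2 rest' =>
      have hne : ((first :: kp2 :: rest').length == 1) = false := by
        simp only [List.length_cons, beq_eq_false_iff_ne]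
        omega
      simp only [hne, Bool.false_eq_true, if_false, List.headD_cons]
      show findCommonParentLoop (first :: kp2 :: rest') first first.length 0 [] =
        (kp2 :: rest').foldl (fun common kp => common.take (prefLen common kp)) first
      have := A_loop_eq_cf first (first :: kp2 :: rest') (by simp) first 0 (by simp)
      rw [this]
      have hmap : (first :: kp2 :: rest').map (List.drop 0) = first :: kp2 :: rest' := by
        simp only [List.map_cons, List.drop_zero]
        congr 1
        congr 1
        exact (List.map_congr_left fun x _ => List.drop_zero).trans (List.map_id _)
      rw [hmap, cf_self_cons, B_eq_cf]
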